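-- pv_equiv track=rewrite | github.com/Harshith55072/IIH---resume-scanner-and-course-recommend-system | service/main.py | calculate_gap
-- ===== SOURCE A (Python) =====
-- SKILL_PRIORITY = {
--     "EV battery": "critical", "BMS": "critical", "battery management": "critical",
--     "motor control": "critical", "PLC": "critical", "SCADA": "critical",
--     "EV powertrain": "critical", "power electronics": "critical",
--     "electric vehicle": "critical", "charging systems": "critical",
--     "inverter": "critical", "battery pack": "critical",
--     "embedded systems": "critical", "CNC": "critical", "robotics": "critical",
--     "BLDC": "important", "lithium ion": "important", "cell balancing": "important",
--     "DC-DC converter": "important", "onboard charger": "important",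
--     "HMI": "important", "DCS": "important", "VFD": "important",
--     "automation": "important", "CAD": "important", "SolidWorks": "important",
--     "AutoCAD": "important", "Python": "important", "MATLAB": "important",
--     "IoT": "important", "microcontroller": "important", "six sigma": "important",
--     "FMEA": "important", "IATF": "important", "transformer": "important",
--     "substation": "important", "relay": "important", "protection system": "important",
--     "teamwork": "minor", "communication": "minor", "leadership": "minor",
--     "documentation": "minor", "reporting": "minor", "time management": "minor",
--     "5S": "minor", "audit": "minor", "ISO": "minor",
--     "QA": "minor", "QC": "minor", "testing": "minor",
--     "Industry 4.0": "important",
-- }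
--
-- COURSE_RECOMMENDATIONS = {
--     "EV battery":        "EV Battery Technology — Naan Mudhalvan / NSDC EV Skill Program",
--     "BMS":               "Battery Management Systems — NSDC Automotive Skill Council",
--     "motor control":     "Electric Motor & Drive Systems — Government Polytechnic TN",
--     "power electronics": "Power Electronics — Anna University NPTEL / Naan Mudhalvan",
--     "PLC":               "PLC Programming & Industrial Automation — Government ITI TN",
--     "SCADA":             "SCADA & DCS Systems — NSDC Smart Manufacturing Program",
--     "robotics":          "Industrial Robotics — TN AutoSkill Development Center",
--     "CAD":               "CAD/CAM Design — Government Polytechnic / CADD Centre TN",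
--     "Python":            "Python Programming — Naan Mudhalvan GUVI Courses",
--     "IoT":               "IoT & Embedded Systems — Naan Mudhalvan / NSDC",
--     "electric vehicle":  "EV Technology Overview — Naan Mudhalvan EV Track",
--     "six sigma":         "Lean Six Sigma — CII Institute of Quality, Chennai",
--     "FMEA":              "Quality Engineering & FMEA — IATF Training Centers TN",
--     "MATLAB":            "MATLAB for Engineers — NPTEL / Anna University",
--     "embedded systems":  "Embedded C & Microcontrollers — Government Polytechnic TN",
--     "automation":        "Industrial Automation — TN Skill Development Corporation",
--     "CNC":               "CNC Operations & Programming — Government ITI TN",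
--     "Industry 4.0":      "Industry 4.0 Fundamentals — Naan Mudhalvan",
-- }
--
-- DEFAULT_COURSE   = "Refer Naan Mudhalvan portal — https://naanmudhalvan.tn.gov.in"
--
-- DEFAULT_PRIORITY = "important"
--
-- def calculate_gap(candidate_skills: list, job_skills: list) -> dict:
--     candidate_set = {s.lower() for s in candidate_skills}
--     gap = [
--         {
--             "skill":    skill,
--             "priority": SKILL_PRIORITY.get(skill, DEFAULT_PRIORITY),
--             "course":   COURSE_RECOMMENDATIONS.get(skill, DEFAULT_COURSE),
--         }
--         for skill in job_skills
--         if skill.lower() not in candidate_set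
--     ]
--     order = {"critical": 0, "important": 1, "minor": 2}
--     gap.sort(key=lambda x: order[x["priority"]])
--     return {
--         "critical":  [g for g in gap if g["priority"] == "critical"],
--         "important": [g for g in gap if g["priority"] == "important"],
--         "minor":     [g for g in gap if g["priority"] == "minor"],
--         "all":       gap,
--     }
-- ===== SOURCE B (Python) =====
-- # B: no priority dict and no sort — priority comes from two frozensets
-- # (critical / minor, default important) and a single pass drops each missing
-- # skill's entry into a dict of three priority buckets, concatenated at the end.
--
-- CRITICAL_SKILLS = frozenset([
--     "EV battery", "BMS", "battery management", "motor control", "PLC",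
--     "SCADA", "EV powertrain", "power electronics", "electric vehicle",
--     "charging systems", "inverter", "battery pack", "embedded systems",
--     "CNC", "robotics",
-- ])
--
-- MINOR_SKILLS = frozenset([
--     "teamwork", "communication", "leadership", "documentation", "reporting",
--     "time management", "5S", "audit", "ISO", "QA", "QC", "testing",
-- ])
--
-- COURSE_RECOMMENDATIONS = {
--     "EV battery":        "EV Battery Technology — Naan Mudhalvan / NSDC EV Skill Program",
--     "BMS":               "Battery Management Systems — NSDC Automotive Skill Council",
--     "motor control":     "Electric Motor & Drive Systems — Government Polytechnic TN",
--     "power electronics": "Power Electronics — Anna University NPTEL / Naan Mudhalvan",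
--     "PLC":               "PLC Programming & Industrial Automation — Government ITI TN",
--     "SCADA":             "SCADA & DCS Systems — NSDC Smart Manufacturing Program",
--     "robotics":          "Industrial Robotics — TN AutoSkill Development Center",
--     "CAD":               "CAD/CAM Design — Government Polytechnic / CADD Centre TN",
--     "Python":            "Python Programming — Naan Mudhalvan GUVI Courses",
--     "IoT":               "IoT & Embedded Systems — Naan Mudhalvan / NSDC",
--     "electric vehicle":  "EV Technology Overview — Naan Mudhalvan EV Track",
--     "six sigma":         "Lean Six Sigma — CII Institute of Quality, Chennai",
--     "FMEA":              "Quality Engineering & FMEA — IATF Training Centers TN",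
--     "MATLAB":            "MATLAB for Engineers — NPTEL / Anna University",
--     "embedded systems":  "Embedded C & Microcontrollers — Government Polytechnic TN",
--     "automation":        "Industrial Automation — TN Skill Development Corporation",
--     "CNC":               "CNC Operations & Programming — Government ITI TN",
--     "Industry 4.0":      "Industry 4.0 Fundamentals — Naan Mudhalvan",
-- }
--
-- DEFAULT_COURSE = "Refer Naan Mudhalvan portal — https://naanmudhalvan.tn.gov.in"
--
--
-- def _priority(skill):
--     if skill in CRITICAL_SKILLS:
--         return "critical"
--     if skill in MINOR_SKILLS:
--         return "minor"
--     return "important"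
--
--
-- def calculate_gap(candidate_skills: list, job_skills: list) -> dict:
--     covered = {s.lower() for s in candidate_skills}
--     buckets = {"critical": [], "important": [], "minor": []}
--     for skill in job_skills:
--         if skill.lower() not in covered:
--             p = _priority(skill)
--             buckets[p].append({
--                 "skill":    skill,
--                 "priority": p,
--                 "course":   COURSE_RECOMMENDATIONS.get(skill, DEFAULT_COURSE),
--             })
--     buckets["all"] = buckets["critical"] + buckets["important"] + buckets["minor"]
--     return buckets
-- ===== Notes on version B (the rewrite author's own statement) =====
-- stated objective: simpler
-- what changed: Replaced the priority dict + build-list + stable sort + three filter passes by two frozensets that decide a skill's priority by membership and one pass over job_skills that appends each missing skill's entry directly into a dict of three priority buckets, concatenated for 'all'.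
import Mathlib
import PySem

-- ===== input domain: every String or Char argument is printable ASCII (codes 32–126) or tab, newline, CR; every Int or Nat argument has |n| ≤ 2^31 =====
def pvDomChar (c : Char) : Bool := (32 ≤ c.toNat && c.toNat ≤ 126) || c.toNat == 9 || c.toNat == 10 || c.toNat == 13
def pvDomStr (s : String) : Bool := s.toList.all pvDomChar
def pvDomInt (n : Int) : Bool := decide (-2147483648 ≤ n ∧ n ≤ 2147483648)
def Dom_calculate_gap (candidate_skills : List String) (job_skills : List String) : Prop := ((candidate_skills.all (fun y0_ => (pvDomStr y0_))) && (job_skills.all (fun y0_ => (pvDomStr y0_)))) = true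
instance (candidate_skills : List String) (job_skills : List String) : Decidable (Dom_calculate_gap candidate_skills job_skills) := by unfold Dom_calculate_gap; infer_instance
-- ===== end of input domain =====

-- B drops the priority dict and the sort: priority is decided by membership in two
-- frozensets (critical / minor, default important) and one pass over job_skills puts
-- each missing skill's entry into a dict of three priority buckets (objective: simpler).

-- ===== PORT A =====
def skillPriority : PySem.Dict String String := ⟨[("EV battery", "critical"), ("BMS", "critical"), ("battery management", "critical"), ("motor control", "critical"), ("PLC", "critical"), ("SCADA", "critical"), ("EV powertrain", "critical"), ("power electronics", "critical"), ("electric vehicle", "critical"), ("charging systems", "critical"), ("inverter", "critical"), ("battery pack", "critical"), ("embedded systems", "critical"), ("CNC", "critical"), ("robotics", "critical"), ("BLDC", "important"), ("lithium ion", "important"), ("cell balancing", "important"), ("DC-DC converter", "important"), ("onboard charger", "important"), ("HMI", "important"), ("DCS", "important"), ("VFD", "important"), ("automation", "important"), ("CAD", "important"), ("SolidWorks", "important"), ("AutoCAD", "important"), ("Python", "important"), ("MATLAB", "important"), ("IoT", "important"), ("microcontroller", "important"), ("six sigma", "important"), ("FMEA", "important"), ("IATF", "important"), ("transformer", "important"),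 ("substation", "important"), ("relay", "important"), ("protection system", "important"), ("teamwork", "minor"), ("communication", "minor"), ("leadership", "minor"), ("documentation", "minor"), ("reporting", "minor"), ("time management", "minor"), ("5S", "minor"), ("audit", "minor"), ("ISO", "minor"), ("QA", "minor"), ("QC", "minor"), ("testing", "minor"), ("Industry 4.0", "important")]⟩
-- COURSE_RECOMMENDATIONS / DEFAULT_COURSE are module constants used verbatim by both Pythons
def courseRecs : PySem.Dict String String := ⟨[("EV battery", "EV Battery Technology — Naan Mudhalvan / NSDC EV Skill Program"), ("BMS", "Battery Management Systems — NSDC Automotive Skill Council"), ("motor control", "Electric Motor & Drive Systems — Government Polytechnic TN"), ("power electronics", "Power Electronics — Anna University NPTEL / Naan Mudhalvan"), ("PLC", "PLC Programming & Industrial Automation — Government ITI TN"), ("SCADA", "SCADA & DCS Systems — NSDC Smart Manufacturing Program"), ("robotics", "Industrial Robotics — TN AutoSkill Development Center"), ("CAD", "CAD/CAM Design — Government Polytechnic / CADD Centre TN"), ("Python", "Python Programming — Naan Mudhalvan GUVI Courses"), ("IoT", "IoT & Embedded Systems — Naan Mudhalvan / NSDC"), ("electric vehicle", "EV Technology Overview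 — Naan Mudhalvan EV Track"), ("six sigma", "Lean Six Sigma — CII Institute of Quality, Chennai"), ("FMEA", "Quality Engineering & FMEA — IATF Training Centers TN"), ("MATLAB", "MATLAB for Engineers — NPTEL / Anna University"), ("embedded systems", "Embedded C & Microcontrollers — Government Polytechnic TN"), ("automation", "Industrial Automation — TN Skill Development Corporation"), ("CNC", "CNC Operations & Programming — Government ITI TN"), ("Industry 4.0", "Industry 4.0 Fundamentals — Naan Mudhalvan")]⟩
def defaultCourse : String := "Refer Naan Mudhalvan portal — https://naanmudhalvan.tn.gov.in"
def defaultPriority : String := "important"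
-- SKILL_PRIORITY.get(skill, DEFAULT_PRIORITY)
def priOf (skill : String) : String := PySem.Dict.getD skillPriority skill defaultPriority
-- the comprehension body: the entry dict built for one missing skill
def gapEntry (skill : String) : List (String × String) :=
  [("skill", skill), ("priority", priOf skill),
   ("course", PySem.Dict.getD courseRecs skill defaultCourse)]
-- g["priority"]: the key is present in every entry A builds, so getD is exact there
def entryPri (g : List (String × String)) : String := PySem.Dict.getD ⟨g⟩ "priority" ""
-- order[x["priority"]]: the priority is always a key of order, so getD is exact there
def orderKey (g : List (String × String)) : Int :=
  PySem.Dict.getD (⟨[("critical", 0), ("important", 1), ("minor", 2)]⟩ : PySem.Dict String Int) (entryPri g) 0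

def calculate_gap (candidate_skills : List String) (job_skills : List String) : List (String × List (List (String × String))) :=
  let candidateSet : PySem.Set String := PySem.Set.ofList (candidate_skills.map PySem.Str.lower)
  let gap := (job_skills.filter
      (fun skill => !(PySem.Set.contains candidateSet (PySem.Str.lower skill)))).map gapEntry
  let gapS := PySem.List.sorted gap orderKey
  [("critical",  gapS.filter (fun g => entryPri g == "critical")),
   ("important", gapS.filter (fun g => entryPri g == "important")),
   ("minor",     gapS.filter (fun g => entryPri g == "minor")),
   ("all", gapS)]

-- ===== PORT B =====
-- CRITICAL_SKILLS / MINOR_SKILLS frozensets of Source B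
def critSet : PySem.Set String := PySem.Set.ofList ["EV battery", "BMS", "battery management", "motor control", "PLC", "SCADA", "EV powertrain", "power electronics", "electric vehicle", "charging systems", "inverter", "battery pack", "embedded systems", "CNC", "robotics"]
def minorSet : PySem.Set String := PySem.Set.ofList ["teamwork", "communication", "leadership", "documentation", "reporting", "time management", "5S", "audit", "ISO", "QA", "QC", "testing"]
-- Source B's _priority helper
def bPriority (skill : String) : String :=
  if PySem.Set.contains critSet skill then "critical"
  else if PySem.Set.contains minorSet skill then "minor"
  else "important"
-- the body of Source B's for-loop: buckets[p].append(entry) for a missing skill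
def bucketStep (covered : PySem.Set String)
    (buckets : PySem.Dict String (List (List (String × String)))) (skill : String) :
    PySem.Dict String (List (List (String × String))) :=
  if !(PySem.Set.contains covered (PySem.Str.lower skill)) then
    let p := bPriority skill
    PySem.Dict.modify buckets p []
      (fun l => l ++ [[("skill", skill), ("priority", p),
                       ("course", PySem.Dict.getD courseRecs skill defaultCourse)]])
  else buckets

def calculate_gap_alt (candidate_skills : List String) (job_skills : List String) : List (String × List (List (String × String))) :=
  let covered : PySem.Set String := PySem.Set.ofList (candidate_skills.map PySem.Str.lower)
  let buckets := job_skills.foldl (bucketStep covered)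
    (PySem.Dict.ofList [("critical", []), ("important", []), ("minor", [])])
  (PySem.Dict.insert buckets "all"
      (PySem.Dict.getD buckets "critical" [] ++ PySem.Dict.getD buckets "important" []
        ++ PySem.Dict.getD buckets "minor" [])).items

-- ===== PRECONDITION & SPEC =====
def Spec_calculate_gap (candidate_skills : List String) (job_skills : List String) (out : List (String × List (List (String × String)))) : Prop := out = calculate_gap_alt candidate_skills job_skills
instance (candidate_skills : List String) (job_skills : List String) (out : List (String × List (List (String × String)))) : Decidable (Spec_calculate_gap candidate_skills job_skills out) := by unfold Spec_calculate_gap; infer_instance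

-- ===== CLAIM (what is proved, stated in full; the proofs are below) =====
def Claim_equal_calculate_gap : Prop := ∀ (candidate_skills : List String) (job_skills : List String), Dom_calculate_gap candidate_skills job_skills → Spec_calculate_gap candidate_skills job_skills (calculate_gap candidate_skills job_skills)

-- ===== LEMMAS AND PROOFS =====

lemma getD_range {κ ν : Type} [BEq κ] (d : PySem.Dict κ ν) (k : κ) (dflt : ν) :
    PySem.Dict.getD d k dflt = dflt ∨ PySem.Dict.getD d k dflt ∈ d.items.map Prod.snd := by
  unfold PySem.Dict.getD PySem.Dict.get?
  cases h : List.find? (fun p => p.1 == k) d.items with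
  | none => left; rfl
  | some kv =>
      right
      simp only [Option.map_some, Option.getD_some]
      exact List.mem_map.mpr ⟨kv, List.mem_of_find?_eq_some h, rfl⟩

lemma priOf_mem (s : String) :
    priOf s = "critical" ∨ priOf s = "important" ∨ priOf s = "minor" := by
  rcases getD_range skillPriority s defaultPriority with h | h
  · right; left; exact h
  · have hall : ∀ v ∈ skillPriority.items.map Prod.snd,
        v = "critical" ∨ v = "important" ∨ v = "minor" := by decide
    exact hall _ h

lemma entryPri_gapEntry (s : String) : entryPri (gapEntry s) = priOf s := by
  simp [entryPri, gapEntry, PySem.Dict.getD, PySem.Dict.get?, List.find?]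

-- every skill of B's critical (resp. minor) set is marked so by the priority dict
lemma priOf_of_crit : ∀ s ∈ (critSet : List String), priOf s = "critical" := by decide

lemma priOf_of_minor : ∀ s ∈ (minorSet : List String), priOf s = "minor" := by decide

lemma priOf_default {s : String}
    (h1 : PySem.Set.contains critSet s = false)
    (h2 : PySem.Set.contains minorSet s = false) : priOf s = "important" := by
  unfold priOf PySem.Dict.getD PySem.Dict.get?
  cases hf : List.find? (fun p => p.1 == s) skillPriority.items with
  | none => rfl
  | some kv =>
      have hmem := List.mem_of_find?_eq_some hf
      have hk : kv.1 = s := by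
        have := List.find?_some hf
        exact eq_of_beq this
      have hcls : ∀ p ∈ skillPriority.items,
          PySem.Set.contains critSet p.1 = true ∨ PySem.Set.contains minorSet p.1 = true
            ∨ p.2 = "important" := by decide
      rcases hcls kv hmem with hc | hc | hc
      · rw [hk] at hc; rw [hc] at h1; exact absurd h1 (by simp)
      · rw [hk] at hc; rw [hc] at h2; exact absurd h2 (by simp)
      · simp [hc]

lemma priOf_eq_bPriority (s : String) : priOf s = bPriority s := by
  unfold bPriority
  by_cases h1 : PySem.Set.contains critSet s = true
  · rw [if_pos h1]
    exact priOf_of_crit s (by simpa using h1)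
  · have h1' : PySem.Set.contains critSet s = false := by
      revert h1; cases PySem.Set.contains critSet s <;> simp
    rw [if_neg h1]
    by_cases h2 : PySem.Set.contains minorSet s = true
    · rw [if_pos h2]
      exact priOf_of_minor s (by simpa using h2)
    · have h2' : PySem.Set.contains minorSet s = false := by
        revert h2; cases PySem.Set.contains minorSet s <;> simp
      rw [if_neg h2]
      exact priOf_default h1' h2'

-- A-side: the stable sort by priority equals the three filters concatenated
lemma insertBy_cons_of_not {α : Type} (before : α → α → Bool) (x y : α) (rest : List α)
    (hy : before x y = false) :
    PySem.List.insertBy before x (y :: rest) = y :: PySem.List.insertBy before x rest := by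
  cases rest with
  | nil => simp [PySem.List.insertBy, hy]
  | cons a b =>
      conv_lhs => rw [PySem.List.insertBy]
      simp [hy]

lemma insertBy_append_of_not_before {α : Type} (before : α → α → Bool) (x : α)
    (pre d : List α) (h : ∀ y ∈ pre, before x y = false) :
    PySem.List.insertBy before x (pre ++ d) = pre ++ PySem.List.insertBy before x d := by
  induction pre with
  | nil => rfl
  | cons y t ih =>
      rw [List.cons_append, insertBy_cons_of_not before x y (t ++ d) (h y (by simp)),
        ih (fun z hz => h z (by simp [hz])), List.cons_append]

lemma insertBy_cons_of_before {α : Type} (before : α → α → Bool) (x : α)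
    (d : List α) (h : ∀ y ∈ d, before x y = true) :
    PySem.List.insertBy before x d = x :: d := by
  cases d with
  | nil => rfl
  | cons y t => simp [PySem.List.insertBy, h y (by simp)]

lemma orderKey_critical {g : List (String × String)} (h : entryPri g = "critical") :
    orderKey g = 0 := by simp [orderKey, h, PySem.Dict.getD, PySem.Dict.get?, List.find?]
lemma orderKey_important {g : List (String × String)} (h : entryPri g = "important") :
    orderKey g = 1 := by simp [orderKey, h, PySem.Dict.getD, PySem.Dict.get?, List.find?]
lemma orderKey_minor {g : List (String × String)} (h : entryPri g = "minor") :
    orderKey g = 2 := by simp [orderKey, h, PySem.Dict.getD, PySem.Dict.get?, List.find?]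

lemma sorted_foldl (l c i m : List (List (String × String)))
    (hc : ∀ g ∈ c, entryPri g = "critical")
    (hi : ∀ g ∈ i, entryPri g = "important")
    (hm : ∀ g ∈ m, entryPri g = "minor")
    (hl : ∀ g ∈ l, entryPri g = "critical" ∨ entryPri g = "important" ∨ entryPri g = "minor") :
    l.foldl (fun acc x => PySem.List.insertBy (fun a b => decide (orderKey a < orderKey b)) x acc) (c ++ i ++ m)
      = (c ++ l.filter (fun g => entryPri g == "critical"))
        ++ (i ++ l.filter (fun g => entryPri g == "important"))
        ++ (m ++ l.filter (fun g => entryPri g == "minor")) := by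
  induction l generalizing c i m with
  | nil => simp
  | cons x t ih =>
      have hx := hl x (by simp)
      have ht : ∀ g ∈ t, entryPri g = "critical" ∨ entryPri g = "important" ∨ entryPri g = "minor" :=
        fun g hg => hl g (by simp [hg])
      rcases hx with hx | hx | hx
      · have hstep : PySem.List.insertBy (fun a b => decide (orderKey a < orderKey b)) x (c ++ i ++ m)
            = (c ++ [x]) ++ i ++ m := by
          rw [List.append_assoc]
          rw [insertBy_append_of_not_before _ x c (i ++ m)
            (fun y hy => by simp [orderKey_critical hx, orderKey_critical (hc y hy)])]
          rw [insertBy_cons_of_before _ x (i ++ m)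
            (fun y hy => by
              rcases List.mem_append.mp hy with hy | hy
              · simp [orderKey_critical hx, orderKey_important (hi y hy)]
              · simp [orderKey_critical hx, orderKey_minor (hm y hy)])]
          simp
        simp only [List.foldl_cons, hstep]
        rw [ih (c ++ [x]) i m
          (fun g hg => by rcases List.mem_append.mp hg with hg | hg
                          · exact hc g hg
                          · simp at hg; subst hg; exact hx) hi hm ht]
        simp [hx]
      · have hstep : PySem.List.insertBy (fun a b => decide (orderKey a < orderKey b)) x (c ++ i ++ m)
            = c ++ (i ++ [x]) ++ m := by
          rw [List.append_assoc]
          rw [insertBy_append_of_not_before _ x c (i ++ m)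
            (fun y hy => by simp [orderKey_important hx, orderKey_critical (hc y hy)])]
          rw [insertBy_append_of_not_before _ x i m
            (fun y hy => by simp [orderKey_important hx, orderKey_important (hi y hy)])]
          rw [insertBy_cons_of_before _ x m
            (fun y hy => by simp [orderKey_important hx, orderKey_minor (hm y hy)])]
          simp
        simp only [List.foldl_cons, hstep]
        rw [ih c (i ++ [x]) m hc
          (fun g hg => by rcases List.mem_append.mp hg with hg | hg
                          · exact hi g hg
                          · simp at hg; subst hg; exact hx) hm ht]
        simp [hx]
      · have hstep : PySem.List.insertBy (fun a b => decide (orderKey a < orderKey b)) x (c ++ i ++ m)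
            = c ++ i ++ (m ++ [x]) := by
          rw [PySem.List.insertBy_of_forall_not_before _ x (c ++ i ++ m)
            (fun y hy => by
              rcases List.mem_append.mp hy with hy' | hy'
              · rcases List.mem_append.mp hy' with hy'' | hy''
                · simp [orderKey_minor hx, orderKey_critical (hc y hy'')]
                · simp [orderKey_minor hx, orderKey_important (hi y hy'')]
              · simp [orderKey_minor hx, orderKey_minor (hm y hy')])]
          simp
        simp only [List.foldl_cons, hstep]
        rw [ih c i (m ++ [x]) hc hi
          (fun g hg => by rcases List.mem_append.mp hg with hg | hg
                          · exact hm g hg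
                          · simp at hg; subst hg; exact hx) ht]
        simp [hx]

-- B-side: Dict.modify on the literal three-bucket dict, one lemma per key
lemma modify_crit (c i m : List (List (String × String))) (f) :
    PySem.Dict.modify (⟨[("critical", c), ("important", i), ("minor", m)]⟩ :
        PySem.Dict String (List (List (String × String)))) "critical" [] f
      = ⟨[("critical", f c), ("important", i), ("minor", m)]⟩ := by
  simp [PySem.Dict.modify, PySem.Dict.insert, PySem.Dict.getD, PySem.Dict.get?, PySem.Dict.contains]

lemma modify_imp (c i m : List (List (String × String))) (f) :
    PySem.Dict.modify (⟨[("critical", c), ("important", i), ("minor", m)]⟩ :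
        PySem.Dict String (List (List (String × String)))) "important" [] f
      = ⟨[("critical", c), ("important", f i), ("minor", m)]⟩ := by
  simp [PySem.Dict.modify, PySem.Dict.insert, PySem.Dict.getD, PySem.Dict.get?, PySem.Dict.contains]

lemma modify_min (c i m : List (List (String × String))) (f) :
    PySem.Dict.modify (⟨[("critical", c), ("important", i), ("minor", m)]⟩ :
        PySem.Dict String (List (List (String × String)))) "minor" [] f
      = ⟨[("critical", c), ("important", i), ("minor", f m)]⟩ := by
  simp [PySem.Dict.modify, PySem.Dict.insert, PySem.Dict.getD, PySem.Dict.get?, PySem.Dict.contains]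

-- B's loop invariant: the bucket dict after the fold
lemma bfold (js : List String) (cov : PySem.Set String) (c i m : List (List (String × String))) :
    js.foldl (bucketStep cov) ⟨[("critical", c), ("important", i), ("minor", m)]⟩
      = ⟨[("critical", c ++ ((js.filter (fun s => !(PySem.Set.contains cov (PySem.Str.lower s)))).map gapEntry).filter (fun g => entryPri g == "critical")),
          ("important", i ++ ((js.filter (fun s => !(PySem.Set.contains cov (PySem.Str.lower s)))).map gapEntry).filter (fun g => entryPri g == "important")),
          ("minor", m ++ ((js.filter (fun s => !(PySem.Set.contains cov (PySem.Str.lower s)))).map gapEntry).filter (fun g => entryPri g == "minor"))]⟩ := by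
  induction js generalizing c i m with
  | nil => simp
  | cons s t ih =>
      by_cases hs : PySem.Set.contains cov (PySem.Str.lower s) = true
      · have hstep : bucketStep cov ⟨[("critical", c), ("important", i), ("minor", m)]⟩ s
            = ⟨[("critical", c), ("important", i), ("minor", m)]⟩ := by
          simp only [bucketStep]; rw [hs]; simp
        rw [List.foldl_cons, hstep, ih c i m]
        simp [show PySem.Str.lower s ∈ cov from by simpa using hs]
      · have hs' : PySem.Set.contains cov (PySem.Str.lower s) = false := by
          revert hs; cases PySem.Set.contains cov (PySem.Str.lower s) <;> simp
        have hns : PySem.Str.lower s ∉ cov := by simpa using hs'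
        have hpe : [("skill", s), ("priority", bPriority s),
            ("course", PySem.Dict.getD courseRecs s defaultCourse)] = gapEntry s := by
          rw [gapEntry, priOf_eq_bPriority]
        rcases priOf_mem s with hp | hp | hp
        · have hb : bPriority s = "critical" := (priOf_eq_bPriority s).symm.trans hp
          have hstep : bucketStep cov ⟨[("critical", c), ("important", i), ("minor", m)]⟩ s
              = ⟨[("critical", c ++ [gapEntry s]), ("important", i), ("minor", m)]⟩ := by
            simp only [bucketStep]; rw [hs']
            simp only [Bool.not_false, if_pos]
            rw [hpe, hb, modify_crit]
          rw [List.foldl_cons, hstep, ih (c ++ [gapEntry s]) i m]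
          simp [hns, entryPri_gapEntry, hp]
        · have hb : bPriority s = "important" := (priOf_eq_bPriority s).symm.trans hp
          have hstep : bucketStep cov ⟨[("critical", c), ("important", i), ("minor", m)]⟩ s
              = ⟨[("critical", c), ("important", i ++ [gapEntry s]), ("minor", m)]⟩ := by
            simp only [bucketStep]; rw [hs']
            simp only [Bool.not_false, if_pos]
            rw [hpe, hb, modify_imp]
          rw [List.foldl_cons, hstep, ih c (i ++ [gapEntry s]) m]
          simp [hns, entryPri_gapEntry, hp]
        · have hb : bPriority s = "minor" := (priOf_eq_bPriority s).symm.trans hp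
          have hstep : bucketStep cov ⟨[("critical", c), ("important", i), ("minor", m)]⟩ s
              = ⟨[("critical", c), ("important", i), ("minor", m ++ [gapEntry s])]⟩ := by
            simp only [bucketStep]; rw [hs']
            simp only [Bool.not_false, if_pos]
            rw [hpe, hb, modify_min]
          rw [List.foldl_cons, hstep, ih c i (m ++ [gapEntry s])]
          simp [hns, entryPri_gapEntry, hp]

lemma getD_lit (c i m : List (List (String × String))) :
    PySem.Dict.getD (⟨[("critical", c), ("important", i), ("minor", m)]⟩ :
        PySem.Dict String (List (List (String × String)))) "critical" [] = c ∧
    PySem.Dict.getD (⟨[("critical", c), ("important", i), ("minor", m)]⟩ :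
        PySem.Dict String (List (List (String × String)))) "important" [] = i ∧
    PySem.Dict.getD (⟨[("critical", c), ("important", i), ("minor", m)]⟩ :
        PySem.Dict String (List (List (String × String)))) "minor" [] = m := by
  refine ⟨?_, ?_, ?_⟩ <;> simp [PySem.Dict.getD, PySem.Dict.get?, List.find?]

lemma insert_all (c i m a : List (List (String × String))) :
    PySem.Dict.insert (⟨[("critical", c), ("important", i), ("minor", m)]⟩ :
        PySem.Dict String (List (List (String × String)))) "all" a
      = ⟨[("critical", c), ("important", i), ("minor", m), ("all", a)]⟩ := by
  simp [PySem.Dict.insert, PySem.Dict.contains]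

-- ===== VERDICT (by name: the statement is the Claim_ definition above) =====
theorem calculate_gap_spec : Claim_equal_calculate_gap := by
  intro cs js _
  unfold Spec_calculate_gap calculate_gap calculate_gap_alt
  dsimp only
  set cset := PySem.Set.ofList (cs.map PySem.Str.lower) with hcset
  set gap := (js.filter (fun skill => !(PySem.Set.contains cset (PySem.Str.lower skill)))).map gapEntry with hgap
  have htri : ∀ g ∈ gap, entryPri g = "critical" ∨ entryPri g = "important" ∨ entryPri g = "minor" := by
    intro g hg
    rcases List.mem_map.mp hg with ⟨s, _, rfl⟩
    rw [entryPri_gapEntry]; exact priOf_mem s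
  have hsorted : PySem.List.sorted gap orderKey
      = gap.filter (fun g => entryPri g == "critical")
        ++ gap.filter (fun g => entryPri g == "important")
        ++ gap.filter (fun g => entryPri g == "minor") := by
    rw [PySem.List.sorted_eq_foldl_insertBy]
    have := sorted_foldl gap [] [] [] (by simp) (by simp) (by simp) htri
    simpa using this
  have hB := bfold js cset [] [] []
  simp only [List.nil_append] at hB
  have hofl : PySem.Dict.ofList [("critical", ([] : List (List (String × String)))), ("important", []), ("minor", [])]
      = (⟨[("critical", []), ("important", []), ("minor", [])]⟩ :
          PySem.Dict String (List (List (String × String)))) := by decide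
  rw [hofl, hB]
  obtain ⟨g1, g2, g3⟩ := getD_lit (gap.filter (fun g => entryPri g == "critical"))
    (gap.filter (fun g => entryPri g == "important")) (gap.filter (fun g => entryPri g == "minor"))
  rw [g1, g2, g3, insert_all, hsorted]
  have fcrit : ∀ (p q : List (String × String) → Bool),
      (∀ g ∈ gap, p g = true → q g = false) →
      (gap.filter q).filter p = [] := by
    intro p q h
    apply List.filter_eq_nil_iff.mpr
    intro g hg
    have hgm := List.mem_filter.mp hg
    intro hp
    have := h g hgm.1 hp
    rw [this] at hgm
    exact absurd hgm.2 (by simp)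
  have self_filter : ∀ (p : List (String × String) → Bool), (gap.filter p).filter p = gap.filter p := by
    intro p
    apply List.filter_eq_self.mpr
    intro g hg
    exact (List.mem_filter.mp hg).2
  have h12 : ∀ g ∈ gap, (entryPri g == "critical") = true → (entryPri g == "important") = false := by
    intro g _ h; simp at h ⊢; simp [h]
  have h13 : ∀ g ∈ gap, (entryPri g == "critical") = true → (entryPri g == "minor") = false := by
    intro g _ h; simp at h ⊢; simp [h]
  have h21 : ∀ g ∈ gap, (entryPri g == "important") = true → (entryPri g == "critical") = false := by
    intro g _ h; simp at h ⊢; simp [h]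
  have h23 : ∀ g ∈ gap, (entryPri g == "important") = true → (entryPri g == "minor") = false := by
    intro g _ h; simp at h ⊢; simp [h]
  have h31 : ∀ g ∈ gap, (entryPri g == "minor") = true → (entryPri g == "critical") = false := by
    intro g _ h; simp at h ⊢; simp [h]
  have h32 : ∀ g ∈ gap, (entryPri g == "minor") = true → (entryPri g == "important") = false := by
    intro g _ h; simp at h ⊢; simp [h]
  simp only [List.filter_append, self_filter,
    fcrit _ _ h21, fcrit _ _ h31, fcrit _ _ h12, fcrit _ _ h32, fcrit _ _ h13, fcrit _ _ h23]
  simp [hgap]
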